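-- pv_equiv track=rewrite | github.com/Part1x/module-2_6 | 2_6.py | generate_password
-- ===== SOURCE A (Python) =====
-- def generate_password(n):
--     result = ''
--     for a in range(1, 21):
--         for b in range(a + 1, 21):
--             pair_sum = a + b
--             if n % pair_sum == 0:
--                 result += str(a) + str(b)
--     return result
-- ===== SOURCE B (Python) =====
-- def generate_password(n):
--     pairs = []
--     for s in range(3, 40):
--         if n % s == 0:
--             for a in range(max(1, s - 20), (s - 1) // 2 + 1):
--                 pairs.append((a, s - a))
--     pairs.sort()
--     return ''.join(str(a) + str(b) for a, b in pairs)
-- ===== Notes on version B (the rewrite author's own statement) =====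
-- stated objective: alternative
-- what changed: Instead of mod-testing every pair in a nested double loop, B first finds the candidate pair-sums s that divide n, derives each such sum's complementary pairs arithmetically from the bounds on a and b, sorts the collected pairs lexicographically and joins them.
import Mathlib
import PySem

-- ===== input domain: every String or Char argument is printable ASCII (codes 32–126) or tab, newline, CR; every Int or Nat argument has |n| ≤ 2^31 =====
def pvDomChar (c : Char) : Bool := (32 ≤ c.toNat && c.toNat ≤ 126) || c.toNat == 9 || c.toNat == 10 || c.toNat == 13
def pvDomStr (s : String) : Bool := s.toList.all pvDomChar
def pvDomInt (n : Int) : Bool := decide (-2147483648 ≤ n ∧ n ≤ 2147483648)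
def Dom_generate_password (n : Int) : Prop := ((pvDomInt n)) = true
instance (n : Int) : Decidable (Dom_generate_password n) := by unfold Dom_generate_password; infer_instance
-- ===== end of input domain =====

-- B replaces A's 'mod-test every pair' double loop by a 'find the divisible sums,
-- derive their pairs arithmetically, sort, join' decomposition (objective: alternative).

-- ===== PORT A =====
def generate_password (n : Int) : String :=
  (PySem.List.pyRange 1 21 1).foldl (fun result a =>
    (PySem.List.pyRange (a + 1) 21 1).foldl (fun result b =>
      let pair_sum := a + b
      if PySem.Int.mod n pair_sum = 0 then
        result ++ (PySem.Int.toStr a ++ PySem.Int.toStr b)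
      else result) result) ""

-- ===== PORT B =====
def generate_password_alt (n : Int) : String :=
  let pairs : List (Int × Int) :=
    (PySem.List.pyRange 3 40 1).foldl (fun pairs s =>
      if PySem.Int.mod n s = 0 then
        (PySem.List.pyRange (max 1 (s - 20)) (PySem.Int.floordiv (s - 1) 2 + 1) 1).foldl
          (fun pairs a => pairs ++ [(a, s - a)]) pairs
      else pairs) []
  let sorted := PySem.List.sorted2 pairs (fun p => p.1) (fun p => p.2)
  PySem.Str.join "" (sorted.map (fun p => PySem.Int.toStr p.1 ++ PySem.Int.toStr p.2))

-- ===== PRECONDITION & SPEC =====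
def Spec_generate_password (n : Int) (out : String) : Prop := out = generate_password_alt n
instance (n : Int) (out : String) : Decidable (Spec_generate_password n out) := by unfold Spec_generate_password; infer_instance

-- ===== CLAIM (what is proved, stated in full; the proofs are below) =====
def Claim_equal_generate_password : Prop := ∀ (n : Int), Dom_generate_password n → Spec_generate_password n (generate_password n)

-- ===== LEMMAS AND PROOFS =====

-- the test A applies to a pair, the text contributed by a pair, and A's enumeration order
def pvQ (n : Int) (p : Int × Int) : Bool := decide (PySem.Int.mod n (p.1 + p.2) = 0)
def pvG (p : Int × Int) : List Char := PySem.Int.toChars p.1 ++ PySem.Int.toChars p.2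
def pvKey (p : Int × Int) : Int := p.1 * 100 + p.2

-- all pairs (a,b) with 1 ≤ a < b ≤ 20, in A's (lexicographic) enumeration order
def pvPfull : List (Int × Int) :=
  (PySem.List.pyRange 1 21 1).flatMap (fun a => (PySem.List.pyRange (a + 1) 21 1).map (fun b => (a, b)))

-- the pairs that make it into A's result
def pvAlist (n : Int) : List (Int × Int) := pvPfull.filter (pvQ n)

-- the pairs B generates for a single sum s, and B's whole pair list
def pvL (s : Int) : List (Int × Int) :=
  (PySem.List.pyRange (max 1 (s - 20)) (PySem.Int.floordiv (s - 1) 2 + 1) 1).map (fun a => (a, s - a))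
def pvPairs (n : Int) : List (Int × Int) :=
  (PySem.List.pyRange 3 40 1).flatMap (fun s => if PySem.Int.mod n s = 0 then pvL s else [])

-- ---- A's nested string fold renders exactly the filtered pair list ----
lemma pvA_inner (n a : Int) : ∀ (l : List Int) (init : String),
    (l.foldl (fun r b => if PySem.Int.mod n (a + b) = 0 then r ++ (PySem.Int.toStr a ++ PySem.Int.toStr b) else r) init).toList
      = init.toList ++ ((l.filter (fun b => pvQ n (a, b))).map (fun b => pvG (a, b))).flatten := by
  intro l
  induction l with
  | nil => simp
  | cons b t ih =>
    intro init
    simp only [List.foldl_cons]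
    by_cases h : PySem.Int.mod n (a + b) = 0
    · simp [h, ih, pvQ, pvG, String.toList_append, PySem.Int.toList_toStr]
    · simp [h, ih, pvQ]

lemma pvA_outer (n : Int) : ∀ (l : List Int) (init : String),
    (l.foldl (fun result a =>
      (PySem.List.pyRange (a + 1) 21 1).foldl (fun result b =>
        if PySem.Int.mod n (a + b) = 0 then result ++ (PySem.Int.toStr a ++ PySem.Int.toStr b) else result) result) init).toList
      = init.toList ++ (l.map (fun a => (((PySem.List.pyRange (a + 1) 21 1).filter (fun b => pvQ n (a, b))).map (fun b => pvG (a, b))).flatten)).flatten := by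
  intro l
  induction l with
  | nil => simp
  | cons a t ih =>
    intro init
    simp only [List.foldl_cons]
    rw [ih, pvA_inner]
    simp

lemma pvA_toList (n : Int) :
    (generate_password n).toList = ((pvAlist n).map pvG).flatten := by
  show ((PySem.List.pyRange 1 21 1).foldl _ "").toList = _
  rw [pvA_outer]
  have h2 : ∀ (l : List Int) (f : Int → List (Int × Int)) (g : Int × Int → List Char),
      ((l.flatMap f).map g).flatten = (l.map (fun a => ((f a).map g).flatten)).flatten := by
    intro l f g
    induction l with
    | nil => rfl
    | cons a t ih => simp [ih]
  simp only [pvAlist, pvPfull, List.filter_flatMap, h2, List.filter_map]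
  simp [Function.comp_def]

-- ---- B's pair-building fold is pvPairs ----
lemma pvPairs_spec (n : Int) :
    ((PySem.List.pyRange 3 40 1).foldl (fun pairs s =>
      if PySem.Int.mod n s = 0 then
        (PySem.List.pyRange (max 1 (s - 20)) (PySem.Int.floordiv (s - 1) 2 + 1) 1).foldl
          (fun pairs a => pairs ++ [(a, s - a)]) pairs
      else pairs) []) = pvPairs n := by
  have h : ∀ (l : List Int) (acc : List (Int × Int)),
      (l.foldl (fun pairs s =>
        if PySem.Int.mod n s = 0 then
          (PySem.List.pyRange (max 1 (s - 20)) (PySem.Int.floordiv (s - 1) 2 + 1) 1).foldl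
            (fun pairs a => pairs ++ [(a, s - a)]) pairs
        else pairs) acc)
      = acc ++ l.flatMap (fun s => if PySem.Int.mod n s = 0 then pvL s else []) := by
    intro l
    induction l with
    | nil => simp
    | cons s t ih =>
      intro acc
      simp only [List.foldl_cons]
      by_cases hs : PySem.Int.mod n s = 0
      · rw [if_pos hs, PySem.List.foldl_append_singleton_eq_map, ih]
        simp [hs, pvL]
      · rw [if_neg hs, ih]
        simp [hs]
  rw [h]
  simp [pvPairs]

-- every pair B generates for sum s really has sum s
lemma pvL_sum {s : Int} {p : Int × Int} (hp : p ∈ pvL s) : p.1 + p.2 = s := by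
  simp only [pvL, List.mem_map] at hp
  obtain ⟨a, _, rfl⟩ := hp
  simp

-- ---- B's pair list is a rearrangement of A's ----
lemma pvPairs_perm (n : Int) : (pvPairs n).Perm (pvAlist n) := by
  have h1 : pvPairs n = ((PySem.List.pyRange 3 40 1).flatMap pvL).filter (pvQ n) := by
    rw [List.filter_flatMap]
    simp only [pvPairs]
    apply List.flatMap_congr
    intro s hs
    by_cases h : PySem.Int.mod n s = 0
    · rw [if_pos h, List.filter_eq_self.mpr]
      intro p hp
      simp [pvQ, pvL_sum hp, h]
    · rw [if_neg h]
      symm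
      rw [List.filter_eq_nil_iff]
      intro p hp
      simp [pvQ, pvL_sum hp, h]
  have h2 : ((PySem.List.pyRange 3 40 1).flatMap pvL).Perm pvPfull := by decide
  rw [h1]
  exact h2.filter _

set_option maxRecDepth 10000 in
lemma pvAlist_pairwise (n : Int) : (pvAlist n).Pairwise (fun p q => pvKey p < pvKey q) := by
  have h : pvPfull.Pairwise (fun p q => pvKey p < pvKey q) := by decide
  exact List.Pairwise.sublist List.filter_sublist h

-- ---- Python's lexicographic tuple sort is, on B's pair list, the sort by pvKey ----
lemma pv_insertBy_congr {α : Type} (b1 b2 : α → α → Bool) (x : α) :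
    ∀ (ys : List α), (∀ y ∈ ys, b1 x y = b2 x y) →
      PySem.List.insertBy b1 x ys = PySem.List.insertBy b2 x ys := by
  intro ys
  induction ys with
  | nil => intro; rfl
  | cons y t ih =>
    intro h
    simp only [PySem.List.insertBy]
    rw [h y (by simp)]
    by_cases hb : b2 x y = true
    · simp [hb]
    · rw [if_neg hb, if_neg hb, ih (fun z hz => h z (by simp [hz]))]

lemma pv_foldl_insertBy_congr {α : Type} (b1 b2 : α → α → Bool) :
    ∀ (xs acc : List α), (∀ x ∈ xs, ∀ y, (y ∈ acc ∨ y ∈ xs) → b1 x y = b2 x y) →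
      xs.foldl (fun acc x => PySem.List.insertBy b1 x acc) acc
        = xs.foldl (fun acc x => PySem.List.insertBy b2 x acc) acc := by
  intro xs
  induction xs with
  | nil => intro _ _; rfl
  | cons x t ih =>
    intro acc h
    simp only [List.foldl_cons]
    rw [pv_insertBy_congr b1 b2 x acc (fun y hy => h x (by simp) y (Or.inl hy))]
    apply ih
    intro z hz y hy
    refine h z (by simp [hz]) y ?_
    rcases hy with hy | hy
    · rw [PySem.List.mem_insertBy] at hy
      rcases hy with rfl | hy
      · right; simp
      · left; exact hy
    · right; simp [hy]

lemma pvPairs_bounds {n : Int} {p : Int × Int} (hp : p ∈ pvPairs n) :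
    1 ≤ p.1 ∧ p.1 < p.2 ∧ p.2 ≤ 20 := by
  simp only [pvPairs, List.mem_flatMap] at hp
  obtain ⟨s, hs, hmem⟩ := hp
  by_cases h : PySem.Int.mod n s = 0
  · rw [if_pos h] at hmem
    rw [PySem.List.mem_pyRange_one] at hs
    simp only [pvL, List.mem_map] at hmem
    obtain ⟨a, ha, rfl⟩ := hmem
    rw [PySem.List.mem_pyRange_one] at ha
    have h2 : PySem.Int.floordiv (s - 1) 2 = (s - 1) / 2 := PySem.Int.floordiv_eq_ediv_of_pos (by omega)
    rw [h2] at ha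
    refine ⟨by omega, ?_, by omega⟩
    simp only []
    omega
  · rw [if_neg h] at hmem
    simp at hmem

lemma pv_sorted2_eq_sorted (n : Int) :
    PySem.List.sorted2 (pvPairs n) (fun p => p.1) (fun p => p.2)
      = PySem.List.sorted (pvPairs n) pvKey := by
  rw [PySem.List.sorted_eq_foldl_insertBy]
  show (pvPairs n).foldl _ [] = _
  apply pv_foldl_insertBy_congr
  intro x hx y hy
  have hxb := pvPairs_bounds hx
  have hyb : 1 ≤ y.1 ∧ y.1 < y.2 ∧ y.2 ≤ 20 := by
    rcases hy with hy | hy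
    · simp at hy
    · exact pvPairs_bounds hy
  simp only [pvKey]
  rcases hxb with ⟨h1, h2, h3⟩
  rcases hyb with ⟨h4, h5, h6⟩
  by_cases hlt : x.1 < y.1
  · simp [hlt]; omega
  · by_cases hgt : y.1 < x.1
    · simp [hlt, hgt]; omega
    · by_cases h2lt : x.2 < y.2
      · simp [hlt, hgt, h2lt]; omega
      · simp [hlt, hgt, h2lt]; omega

lemma pv_sorted_eq (n : Int) :
    PySem.List.sorted (pvPairs n) pvKey = pvAlist n :=
  PySem.List.sorted_eq_of_perm_of_pairwise_lt _ _ _ (pvPairs_perm n).symm (pvAlist_pairwise n)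

-- ''.join of char lists is flatten
lemma pv_join_nil (l : List (List Char)) : PySem.Chars.join [] l = l.flatten := by
  induction l with
  | nil => rfl
  | cons x t ih => cases t <;> simp_all [PySem.Chars.join, List.intercalate, List.intersperse]

lemma pvB_toList (n : Int) :
    (generate_password_alt n).toList = ((pvAlist n).map pvG).flatten := by
  have h : generate_password_alt n
      = PySem.Str.join "" ((PySem.List.sorted2 (pvPairs n) (fun p => p.1) (fun p => p.2)).map
          (fun p => PySem.Int.toStr p.1 ++ PySem.Int.toStr p.2)) := by
    simp only [generate_password_alt]
    rw [pvPairs_spec]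
  rw [h, pv_sorted2_eq_sorted, pv_sorted_eq, PySem.Str.toList_join, List.map_map]
  have hmap : (String.toList ∘ fun p : Int × Int => PySem.Int.toStr p.1 ++ PySem.Int.toStr p.2) = pvG := by
    funext p
    simp [pvG, String.toList_append, PySem.Int.toList_toStr]
  rw [hmap]
  exact pv_join_nil _

-- ===== VERDICT (by name: the statement is the Claim_ definition above) =====
theorem generate_password_spec : Claim_equal_generate_password := by
  intro n _
  unfold Spec_generate_password
  apply String.toList_inj.mp
  rw [pvA_toList, pvB_toList]
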